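-- pv_equiv track=rewrite | github.com/mfomicheva/diffmask | diffmask/utils/util.py | map_bpe_moses_bert
-- ===== SOURCE A (Python) =====
-- from collections import defaultdict
--
-- def map_bpe_moses_bert(bpe_tokens, moses_tokens, sep='##'):
--     tok_idx_bpe = 0
--     tok_idx_moses = 0
--     mapping = dict()
--     for i in range(len(bpe_tokens)):
--         if i == len(bpe_tokens) - 1:
--             mapping[tok_idx_bpe] = tok_idx_moses
--             break
--         mapping[tok_idx_bpe] = tok_idx_moses
--         split_idx = i + 1 if sep == '##' else i
--         if sep not in bpe_tokens[split_idx]: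
--             tok_idx_moses += 1
--         tok_idx_bpe += 1
--     bpe_to_moses = mapping
--     moses_to_bpe = defaultdict(list)
--     for tok_idx_bpe, tok_idx_moses in mapping.items():
--         moses_to_bpe[tok_idx_moses].append(tok_idx_bpe)
--     return bpe_to_moses, moses_to_bpe
-- ===== SOURCE B (Python) =====
-- from collections import defaultdict
--
--
-- def map_bpe_moses_bert(bpe_tokens, moses_tokens, sep='##'):
--     # Segmentation approach: first collect the word-start positions, then emit
--     # whole word groups between consecutive boundaries -- no running counter.
--     n = len(bpe_tokens)
--     starts = [i for i in range(1, n)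
--               if sep not in (bpe_tokens[i] if sep == '##' else bpe_tokens[i - 1])]
--     bpe_to_moses = {}
--     moses_to_bpe = defaultdict(list)
--     lo = 0
--     for m, hi in enumerate(starts + [n] if n else []):
--         group = list(range(lo, hi))
--         moses_to_bpe[m] = group
--         for i in group:
--             bpe_to_moses[i] = m
--         lo = hi
--     return bpe_to_moses, moses_to_bpe
-- ===== Notes on version B (the rewrite author's own statement) =====
-- stated objective: alternative
-- what changed: Replaces A's single record-then-decide scan (twin running counters with a break, then a second inversion pass) by a segmentation strategy: collect the word-start boundary positions first, then emit whole word groups between consecutive boundaries, filling both mappings group by group with no running moses counter.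
import Mathlib
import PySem

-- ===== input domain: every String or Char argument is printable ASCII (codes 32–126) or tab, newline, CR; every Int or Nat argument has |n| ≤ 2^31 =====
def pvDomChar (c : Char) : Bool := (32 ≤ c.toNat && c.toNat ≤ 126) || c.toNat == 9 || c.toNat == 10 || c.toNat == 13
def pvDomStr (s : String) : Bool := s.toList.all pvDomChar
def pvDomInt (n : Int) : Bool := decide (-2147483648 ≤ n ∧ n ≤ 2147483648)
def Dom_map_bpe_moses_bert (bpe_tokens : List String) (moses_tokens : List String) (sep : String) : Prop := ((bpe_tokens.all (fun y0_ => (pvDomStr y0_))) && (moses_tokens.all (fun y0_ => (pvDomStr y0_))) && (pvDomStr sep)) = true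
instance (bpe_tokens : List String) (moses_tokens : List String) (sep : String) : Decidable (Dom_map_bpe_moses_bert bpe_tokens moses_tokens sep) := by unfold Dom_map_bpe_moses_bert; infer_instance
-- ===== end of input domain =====

-- B replaces A's single record-then-decide scan (twin running counters + break) by a segmentation
-- strategy: collect the word-start boundaries first, then emit whole word groups between
-- consecutive boundaries (simpler decomposition, same cost).


-- ===== PORT A =====
-- A's for-loop over range(len(bpe_tokens)) with its break, twin counters and dict,
-- as structural recursion over the range list.  bpe_tokens[split_idx] is ported with
-- pyGetD _ _ "": for every iteration the loop reaches, 0 ≤ split_idx < len(bpe_tokens),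
-- so the default is never used (Python raises nowhere here).
def mapBertLoopA (bpe_tokens : List String) (sep : String) (n : Int) :
    List Int → Int → Int → PySem.Dict Int Int → PySem.Dict Int Int
  | [], _, _, mapping => mapping
  | i :: rest, tok_idx_bpe, tok_idx_moses, mapping =>
    if i = n - 1 then
      mapping.insert tok_idx_bpe tok_idx_moses          -- then `break`
    else
      let mapping := mapping.insert tok_idx_bpe tok_idx_moses
      let split_idx := if sep = "##" then i + 1 else i
      let tok_idx_moses :=
        if PySem.Str.isIn sep (PySem.List.pyGetD bpe_tokens split_idx "") then tok_idx_moses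
        else tok_idx_moses + 1
      mapBertLoopA bpe_tokens sep n rest (tok_idx_bpe + 1) tok_idx_moses mapping

def map_bpe_moses_bert (bpe_tokens : List String) (moses_tokens : List String) (sep : String) : (List (Int × Int)) × (List (Int × List Int)) :=
  let n : Int := bpe_tokens.length
  let mapping := mapBertLoopA bpe_tokens sep n (PySem.List.pyRange 0 n) 0 0 PySem.Dict.empty
  let moses_to_bpe := mapping.items.foldl
    (fun (d : PySem.Dict Int (List Int)) p => d.modify p.2 [] (fun l => l ++ [p.1]))
    PySem.Dict.empty
  (mapping.items, moses_to_bpe.items)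

-- ===== PORT B =====
-- the boundary test of Source B's comprehension: position i starts a new moses word
def bF (bpe_tokens : List String) (sep : String) (i : Int) : Bool :=
  !(PySem.Str.isIn sep (PySem.List.pyGetD bpe_tokens (if sep = "##" then i else i - 1) ""))

-- starts = [i for i in range(1, n) if sep not in marker(i)]
def mapBertStarts (bpe_tokens : List String) (sep : String) (n : Int) : List Int :=
  (PySem.List.pyRange 1 n).filter (bF bpe_tokens sep)

-- the body of Source B's `for m, hi in enumerate(...)` loop; state = (bpe_to_moses, moses_to_bpe, lo)
def bAltStep (st : PySem.Dict Int Int × PySem.Dict Int (List Int) × Int) (p : Int × Int) :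
    PySem.Dict Int Int × PySem.Dict Int (List Int) × Int :=
  let lo := st.2.2
  let group := PySem.List.pyRange lo p.2
  let m2b := st.2.1.insert p.1 group
  let b2m := group.foldl (fun d i => d.insert i p.1) st.1
  (b2m, m2b, p.2)

def map_bpe_moses_bert_alt (bpe_tokens : List String) (moses_tokens : List String) (sep : String) : (List (Int × Int)) × (List (Int × List Int)) :=
  let n : Int := bpe_tokens.length
  let starts := mapBertStarts bpe_tokens sep n
  let seq : List Int := if n = 0 then [] else starts ++ [n]
  let st := (PySem.List.enumerate seq 0).foldl bAltStep (PySem.Dict.empty, PySem.Dict.empty, 0)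
  (st.1.items, st.2.1.items)

-- ===== PRECONDITION & SPEC =====
def Spec_map_bpe_moses_bert (bpe_tokens : List String) (moses_tokens : List String) (sep : String) (out : (List (Int × Int)) × (List (Int × List Int))) : Prop := out = map_bpe_moses_bert_alt bpe_tokens moses_tokens sep
instance (bpe_tokens : List String) (moses_tokens : List String) (sep : String) (out : (List (Int × Int)) × (List (Int × List Int))) : Decidable (Spec_map_bpe_moses_bert bpe_tokens moses_tokens sep out) := by unfold Spec_map_bpe_moses_bert; infer_instance

-- ===== CLAIM (what is proved, stated in full; the proofs are below) =====
def Claim_equal_map_bpe_moses_bert : Prop := ∀ (bpe_tokens : List String) (moses_tokens : List String) (sep : String), Dom_map_bpe_moses_bert bpe_tokens moses_tokens sep → Spec_map_bpe_moses_bert bpe_tokens moses_tokens sep (map_bpe_moses_bert bpe_tokens moses_tokens sep)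

-- ===== LEMMAS AND PROOFS =====

-- the running moses counter after position i, and the A-side ids-building fold step
def mapBertIdB (bpe_tokens : List String) (sep : String) (m i : Int) : Int :=
  if bF bpe_tokens sep i then m + 1 else m

def mapBertStepB (bpe_tokens : List String) (sep : String) (st : Int × List Int) (i : Int) : Int × List Int :=
  (mapBertIdB bpe_tokens sep st.1 i, st.2 ++ [mapBertIdB bpe_tokens sep st.1 i])

-- the per-word id list: constant segments between consecutive boundaries
def segFlat : Int → List Int → Int → Int → List Int
  | m, [], lo, hi => List.replicate (hi - lo).toNat m
  | m, s :: rest, lo, hi => List.replicate (s - lo).toNat m ++ segFlat (m + 1) rest s hi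

-- the groups of bpe positions between consecutive bounds
def segGroups : Int → List Int → List (List Int)
  | _, [] => []
  | lo, hi :: rest => PySem.List.pyRange lo hi :: segGroups hi rest

-- one moses group as its list of (bpe index, moses index) pairs
def pairify (p : Int × List Int) : List (Int × Int) := p.2.map (fun i => (i, p.1))

lemma pyRange_nil {a b : Int} (h : b ≤ a) : PySem.List.pyRange a b = [] := by
  refine List.eq_nil_iff_forall_not_mem.mpr fun x hx => ?_
  rw [PySem.List.mem_pyRange_one] at hx; omega

lemma pyRange_pairwise (a b : Int) : (PySem.List.pyRange a b).Pairwise (· < ·) := by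
  by_cases h : b ≤ a
  · rw [pyRange_nil h]; exact List.Pairwise.nil
  · push_neg at h
    have hk : ∃ k : Nat, (b - a).toNat = k := ⟨_, rfl⟩
    obtain ⟨k, hk⟩ := hk
    induction k generalizing a with
    | zero => omega
    | succ k ih =>
      rw [PySem.List.pyRange_one_cons h]
      refine List.pairwise_cons.mpr ⟨fun x hx => ?_, ?_⟩
      · rw [PySem.List.mem_pyRange_one] at hx; omega
      · by_cases h2 : b ≤ a + 1
        · rw [pyRange_nil h2]; exact List.Pairwise.nil
        · exact ih (a + 1) (by omega) (by omega)

lemma pyRange_nodup (a b : Int) : (PySem.List.pyRange a b).Nodup :=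
  (pyRange_pairwise a b).imp (fun h => ne_of_lt h)

-- a dict whose items are `enumerate acc 0` does not contain the key `acc.length`
lemma dict_fresh_key (acc : List Int) (d : PySem.Dict Int Int)
    (h : d.items = PySem.List.enumerate acc 0) :
    d.contains (acc.length : Int) = false := by
  rw [PySem.Dict.contains_eq_decide_mem_keys]
  have hk : d.keys = PySem.List.pyRange 0 (acc.length : Int) := by
    show d.items.map (·.1) = _
    rw [h, PySem.List.map_fst_enumerate]
    norm_num
  simp [hk, PySem.List.mem_pyRange_one]

-- core invariant: from iteration i on (1 ≤ i ≤ n-1), A's loop and the ids fold build the same items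
lemma mapBert_core (bpe_tokens : List String) (sep : String) (n : Int)
    (hn : n = bpe_tokens.length) :
    ∀ (k : Nat) (i m : Int) (acc : List Int) (d : PySem.Dict Int Int),
      1 ≤ i → i + (k : Int) = n - 1 →
      (acc.length : Int) = i →
      d.items = PySem.List.enumerate acc 0 →
      (mapBertLoopA bpe_tokens sep n (PySem.List.pyRange i n) i
          (mapBertIdB bpe_tokens sep m i) d).items
        = PySem.List.enumerate
            (((PySem.List.pyRange i n).foldl (mapBertStepB bpe_tokens sep) (m, acc)).2) 0 := by
  intro k
  induction k with
  | zero =>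
    intro i m acc d hi hk hlen hitems
    have hin : i = n - 1 := by omega
    have hlt : i < n := by omega
    rw [PySem.List.pyRange_one_cons hlt]
    have hempty : PySem.List.pyRange (i + 1) n = [] := pyRange_nil (by omega)
    have hfresh : d.contains i = false := by
      have := dict_fresh_key acc d hitems
      rwa [hlen] at this
    simp only [mapBertLoopA, if_pos hin, hempty, List.foldl_cons, List.foldl_nil,
      mapBertStepB]
    rw [PySem.Dict.items_insert_of_not_contains d _ hfresh, hitems,
      PySem.List.enumerate_append]
    simp [hlen]
  | succ k ih =>
    intro i m acc d hi hk hlen hitems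
    have hlt : i < n := by omega
    have hne : ¬ i = n - 1 := by omega
    rw [PySem.List.pyRange_one_cons hlt]
    have hfresh : d.contains i = false := by
      have := dict_fresh_key acc d hitems
      rwa [hlen] at this
    simp only [mapBertLoopA, if_neg hne, List.foldl_cons]
    -- A's split index at step i is exactly the boundary test at position i+1
    have hsplit :
        (if PySem.Str.isIn sep
              (PySem.List.pyGetD bpe_tokens (if sep = "##" then i + 1 else i) "") then
           mapBertIdB bpe_tokens sep m i
         else mapBertIdB bpe_tokens sep m i + 1)
          = mapBertIdB bpe_tokens sep (mapBertIdB bpe_tokens sep m i) (i + 1) := by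
      cases hin : PySem.Str.isIn sep
          (PySem.List.pyGetD bpe_tokens (if sep = "##" then i + 1 else i) "") <;>
        simp only [mapBertIdB, bF, add_sub_cancel_right, hin] <;> simp
    have hstep :
        mapBertStepB bpe_tokens sep (m, acc) i
          = (mapBertIdB bpe_tokens sep m i, acc ++ [mapBertIdB bpe_tokens sep m i]) := rfl
    rw [hstep, hsplit]
    exact ih (i + 1) (mapBertIdB bpe_tokens sep m i)
      (acc ++ [mapBertIdB bpe_tokens sep m i])
      (d.insert i (mapBertIdB bpe_tokens sep m i))
      (by omega) (by push_cast at hk ⊢; omega)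
      (by simp only [List.length_append, List.length_cons, List.length_nil]; push_cast; omega)
      (by
        rw [PySem.Dict.items_insert_of_not_contains d _ hfresh, hitems,
          PySem.List.enumerate_append]
        simp [hlen])

-- A's bpe_to_moses as an item list is the enumeration of the ids fold
lemma mapBert_items_eq (bpe_tokens : List String) (sep : String) (h : bpe_tokens ≠ []) :
    (mapBertLoopA bpe_tokens sep (bpe_tokens.length : Int)
        (PySem.List.pyRange 0 (bpe_tokens.length : Int)) 0 0 PySem.Dict.empty).items
      = PySem.List.enumerate
          (((PySem.List.pyRange 1 (bpe_tokens.length : Int)).foldl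
              (mapBertStepB bpe_tokens sep) (0, [(0 : Int)])).2) 0 := by
  set n : Int := (bpe_tokens.length : Int) with hn
  have hpos : 0 < n := by
    simp only [hn]
    exact_mod_cast Nat.pos_of_ne_zero (fun hz => h (List.eq_nil_of_length_eq_zero hz))
  rw [PySem.List.pyRange_one_cons hpos]
  by_cases h1 : n = 1
  · have hz : (0 : Int) = n - 1 := by omega
    have hempty : PySem.List.pyRange (0 + 1) n = [] := pyRange_nil (by omega)
    simp only [mapBertLoopA]
    rw [if_pos hz, h1]
    have hr11 : PySem.List.pyRange 1 1 = [] := pyRange_nil le_rfl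
    rw [hr11]
    rw [PySem.Dict.items_insert_of_not_contains _ _ (by simp [PySem.Dict.contains_empty])]
    simp [PySem.Dict.empty, PySem.List.enumerate_cons, PySem.List.enumerate_nil]
  · have hne : ¬ (0 : Int) = n - 1 := by omega
    simp only [mapBertLoopA, if_neg hne]
    have hsplit :
        (if PySem.Str.isIn sep
              (PySem.List.pyGetD bpe_tokens (if sep = "##" then (0 : Int) + 1 else 0) "") then
           (0 : Int)
         else (0 : Int) + 1)
          = mapBertIdB bpe_tokens sep 0 1 := by
      rw [show (0 : Int) + 1 = 1 from by norm_num]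
      simp only [mapBertIdB, bF, show (1 : Int) - 1 = 0 from by norm_num]
      cases hin : PySem.Str.isIn sep
          (PySem.List.pyGetD bpe_tokens (if sep = "##" then 1 else 0) "") <;> simp [hin]
    rw [hsplit]
    exact mapBert_core bpe_tokens sep n hn (n - 2).toNat 1 0 [0]
      (PySem.Dict.empty.insert 0 0) (by omega) (by omega)
      (by simp)
      (by
        rw [PySem.Dict.items_insert_of_not_contains _ _ (by simp [PySem.Dict.contains_empty])]
        simp [PySem.List.enumerate_cons, PySem.List.enumerate_nil, PySem.Dict.empty])

lemma segFlat_cons (m : Int) (starts : List Int) (lo hi : Int) (h : lo < hi)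
    (h2 : ∀ s ∈ starts, lo < s) :
    segFlat m starts lo hi = m :: segFlat m starts (lo + 1) hi := by
  cases starts with
  | nil =>
    simp only [segFlat]
    have he : (hi - lo).toNat = (hi - (lo + 1)).toNat + 1 := by omega
    rw [he, List.replicate_succ]
  | cons s rest =>
    have hs : lo < s := h2 s (by simp)
    simp only [segFlat]
    have he : (s - lo).toNat = (s - (lo + 1)).toNat + 1 := by omega
    rw [he, List.replicate_succ, List.cons_append]

-- the ids fold over a range is the boundary segmentation of that range
lemma segfold (f : Int → Bool) :
    ∀ (k : Nat) (lo hi m : Int) (acc : List Int), (hi - lo).toNat = k →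
    ((PySem.List.pyRange lo hi).foldl
        (fun st i => ((if f i then st.1 + 1 else st.1), st.2 ++ [if f i then st.1 + 1 else st.1]))
        (m, acc)).2
      = acc ++ segFlat m ((PySem.List.pyRange lo hi).filter f) lo hi := by
  intro k
  induction k with
  | zero =>
    intro lo hi m acc hk
    rw [pyRange_nil (by omega)]
    simp only [List.foldl_nil, List.filter_nil, segFlat]
    rw [show (hi - lo).toNat = 0 from hk, List.replicate_zero, List.append_nil]
  | succ k ih =>
    intro lo hi m acc hk
    have hlt : lo < hi := by omega
    rw [PySem.List.pyRange_one_cons hlt]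
    have hmem : ∀ s ∈ (PySem.List.pyRange (lo + 1) hi).filter f, lo < s := by
      intro s hs
      have := (List.mem_filter.mp hs).1
      rw [PySem.List.mem_pyRange_one] at this; omega
    rw [List.foldl_cons, List.filter_cons]
    cases hf : f lo with
    | true =>
      simp only [reduceIte]
      rw [ih (lo + 1) hi (m + 1) (acc ++ [m + 1]) (by omega)]
      simp only [segFlat, sub_self, Int.toNat_zero, List.replicate_zero, List.nil_append]
      rw [segFlat_cons (m + 1) _ lo hi hlt hmem, List.append_assoc, List.singleton_append]
    | false =>
      simp only [Bool.false_eq_true, if_false]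
      rw [ih (lo + 1) hi m (acc ++ [m]) (by omega)]
      rw [segFlat_cons m _ lo hi hlt hmem, List.append_assoc, List.singleton_append]

lemma enumerate_replicate :
    ∀ (k : Nat) (lo m : Int),
      PySem.List.enumerate (List.replicate k m) lo
        = (PySem.List.pyRange lo (lo + k)).map (fun i => (i, m)) := by
  intro k
  induction k with
  | zero =>
    intro lo m
    rw [show lo + ((0 : Nat) : Int) = lo by push_cast; ring, pyRange_nil le_rfl]
    simp [PySem.List.enumerate_nil]
  | succ k ih =>
    intro lo m
    rw [List.replicate_succ, PySem.List.enumerate_cons, ih (lo + 1) m,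
      PySem.List.pyRange_one_cons (show lo < lo + ((k + 1 : Nat) : Int) by push_cast; omega),
      List.map_cons]
    have : lo + 1 + (k : Int) = lo + ((k + 1 : Nat) : Int) := by push_cast; ring
    rw [this]

-- enumerating the segmented id list gives the (bpe, moses) pairs of the groups
lemma enumerate_segFlat :
    ∀ (starts : List Int) (m lo hi : Int), List.Pairwise (· ≤ ·) (lo :: (starts ++ [hi])) →
      PySem.List.enumerate (segFlat m starts lo hi) lo
        = (PySem.List.enumerate (segGroups lo (starts ++ [hi])) m).flatMap pairify := by
  intro starts
  induction starts with
  | nil =>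
    intro m lo hi hc
    have hlh : lo ≤ hi := (List.pairwise_cons.mp hc).1 hi (by simp)
    simp only [segFlat, List.nil_append, segGroups, PySem.List.enumerate_cons,
      PySem.List.enumerate_nil]
    rw [enumerate_replicate]
    rw [show lo + ((hi - lo).toNat : Int) = hi by omega]
    simp [pairify]
  | cons s rest ih =>
    intro m lo hi hc
    have hc2 : List.Pairwise (· ≤ ·) (lo :: s :: (rest ++ [hi])) := by simpa using hc
    have hls : lo ≤ s := (List.pairwise_cons.mp hc2).1 s (by simp)
    have hc' : List.Pairwise (· ≤ ·) (s :: (rest ++ [hi])) := (List.pairwise_cons.mp hc2).2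
    simp only [segFlat, List.cons_append, segGroups]
    rw [PySem.List.enumerate_append, enumerate_replicate, List.length_replicate]
    rw [show lo + ((s - lo).toNat : Int) = s by omega]
    rw [ih (m + 1) s hi (by simpa using hc')]
    simp only [PySem.List.enumerate_cons, List.flatMap_cons, pairify]

lemma get?_mk_append_last (base : List (Int × List Int)) (m : Int) (acc : List Int)
    (h : ∀ p ∈ base, (p.1 == m) = false) :
    (PySem.Dict.mk (base ++ [(m, acc)]) : PySem.Dict Int (List Int)).get? m = some acc := by
  induction base with
  | nil => simp [PySem.Dict.get?_mk_cons]
  | cons p t ih =>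
    obtain ⟨k, v⟩ := p
    rw [List.cons_append, PySem.Dict.get?_mk_cons]
    rw [h (k, v) (by simp)]
    exact ih (fun q hq => h q (by simp [hq]))

lemma get?_mk_none (base : List (Int × List Int)) (m : Int)
    (h : ∀ p ∈ base, (p.1 == m) = false) :
    (PySem.Dict.mk base : PySem.Dict Int (List Int)).get? m = none := by
  induction base with
  | nil => exact PySem.Dict.get?_empty m
  | cons p t ih =>
    obtain ⟨k, v⟩ := p
    rw [PySem.Dict.get?_mk_cons, h (k, v) (by simp)]
    exact ih (fun q hq => h q (by simp [hq]))

-- appending one whole group to a fresh key of the moses dict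
lemma modify_run (m : Int) :
    ∀ (g acc : List Int) (base : List (Int × List Int)),
      (∀ p ∈ base, (p.1 == m) = false) →
      ((g.map (fun i => (i, m))).foldl
          (fun (d : PySem.Dict Int (List Int)) q => d.modify q.2 [] (fun l => l ++ [q.1]))
          (PySem.Dict.mk (base ++ [(m, acc)])))
        = PySem.Dict.mk (base ++ [(m, acc ++ g)]) := by
  intro g
  induction g with
  | nil => intro acc base h; simp
  | cons i t ih =>
    intro acc base h
    simp only [List.map_cons, List.foldl_cons]
    have hget := get?_mk_append_last base m acc h
    have hcont : (PySem.Dict.mk (base ++ [(m, acc)]) : PySem.Dict Int (List Int)).contains m = true := by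
      rw [PySem.Dict.contains_eq_isSome_get?, hget]; rfl
    have hgetD : (PySem.Dict.mk (base ++ [(m, acc)]) : PySem.Dict Int (List Int)).getD m [] = acc := by
      rw [PySem.Dict.getD_eq_get?_getD, hget]; rfl
    have hstep :
        (PySem.Dict.mk (base ++ [(m, acc)]) : PySem.Dict Int (List Int)).modify m []
            (fun l => l ++ [i])
          = PySem.Dict.mk (base ++ [(m, acc ++ [i])]) := by
      show (PySem.Dict.mk (base ++ [(m, acc)]) : PySem.Dict Int (List Int)).insert m _ = _
      apply PySem.Dict.ext
      rw [PySem.Dict.items_insert_of_contains _ _ hcont, hgetD]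
      show List.map _ (base ++ [(m, acc)]) = _
      rw [List.map_append]
      congr 1
      · have hid : ∀ p ∈ base,
            (if (p.1 == m) = true then (m, (fun l => l ++ [i]) acc) else p) = p := by
          intro p hp; rw [h p hp]; simp
        rw [List.map_congr_left hid]; simp
      · simp
    rw [hstep, ih (acc ++ [i]) base h, List.append_assoc, List.singleton_append]

-- A's moses_to_bpe loop over the grouped pairs rebuilds exactly the group list
lemma moses_fold :
    ∀ (egs base : List (Int × List Int)),
      (∀ p ∈ egs, p.2 ≠ []) →
      (∀ p ∈ egs, ∀ q ∈ base, (q.1 == p.1) = false) →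
      (egs.map (·.1)).Nodup →
      (egs.foldl
          (fun (d : PySem.Dict Int (List Int)) p =>
            (pairify p).foldl
              (fun (d : PySem.Dict Int (List Int)) q => d.modify q.2 [] (fun l => l ++ [q.1])) d)
          (PySem.Dict.mk base))
        = PySem.Dict.mk (base ++ egs) := by
  intro egs
  induction egs with
  | nil => intro base _ _ _; simp
  | cons p rest ih =>
    obtain ⟨m, g⟩ := p
    intro base h1 h2 h3
    have hg : g ≠ [] := h1 (m, g) (by simp)
    obtain ⟨i, g', rfl⟩ := List.exists_cons_of_ne_nil hg
    have hbase : ∀ q ∈ base, (q.1 == m) = false := h2 (m, i :: g') (by simp)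
    have h3' : ¬ m ∈ rest.map (fun x => x.1) ∧ (rest.map (fun x => x.1)).Nodup := by
      rw [List.map_cons, List.nodup_cons] at h3; exact h3
    rw [List.foldl_cons,
      show pairify (m, i :: g') = (i, m) :: List.map (fun i => (i, m)) g' from rfl]
    simp only [List.foldl_cons]
    have hnone := get?_mk_none base m hbase
    have hcont : (PySem.Dict.mk base : PySem.Dict Int (List Int)).contains m = false := by
      rw [PySem.Dict.contains_eq_isSome_get?, hnone]; rfl
    have hgetD : (PySem.Dict.mk base : PySem.Dict Int (List Int)).getD m [] = [] := by
      rw [PySem.Dict.getD_eq_get?_getD, hnone]; rfl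
    have hstep :
        (PySem.Dict.mk base : PySem.Dict Int (List Int)).modify m [] (fun l => l ++ [i])
          = PySem.Dict.mk (base ++ [(m, [i])]) := by
      show (PySem.Dict.mk base : PySem.Dict Int (List Int)).insert m _ = _
      apply PySem.Dict.ext
      rw [PySem.Dict.items_insert_of_not_contains _ _ hcont, hgetD]
      simp
    rw [hstep, modify_run m g' [i] base hbase]
    have hrest := ih (base ++ [(m, [i] ++ g')])
      (fun q hq => h1 q (by simp [hq]))
      (fun q hq r hr => by
        rcases List.mem_append.mp hr with hb | hm
        · exact h2 q (by simp [hq]) r hb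
        · have hr' : r = (m, [i] ++ g') := by simpa using hm
          subst hr'
          have hq1 : q.1 ∈ rest.map (fun x => x.1) := List.mem_map_of_mem hq
          have hne : m ≠ q.1 := fun he => h3'.1 (he ▸ hq1)
          simpa using hne)
      h3'.2
    rw [hrest]
    simp

-- each group between strictly increasing bounds is nonempty
lemma segGroups_ne_nil :
    ∀ (seq : List Int) (lo : Int), List.Pairwise (· < ·) (lo :: seq) →
      ∀ g ∈ segGroups lo seq, g ≠ [] := by
  intro seq
  induction seq with
  | nil => intro lo _ g hg; simp [segGroups] at hg
  | cons hi rest ih =>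
    intro lo hc g hg
    have hlt : lo < hi := (List.pairwise_cons.mp hc).1 hi (by simp)
    have hc' : List.Pairwise (· < ·) (hi :: rest) := (List.pairwise_cons.mp hc).2
    rcases (by simpa [segGroups] using hg : g = PySem.List.pyRange lo hi ∨ g ∈ segGroups hi rest) with h | h
    · subst h; rw [PySem.List.pyRange_one_cons hlt]; simp
    · exact ih hi hc' g h

-- B's single loop builds both dicts from the group structure
lemma b_fold :
    ∀ (seq : List Int) (s lo : Int) (db : PySem.Dict Int Int) (dm : PySem.Dict Int (List Int)),
      List.Pairwise (· ≤ ·) (lo :: seq) →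
      (∀ i : Int, lo ≤ i → db.contains i = false) →
      (∀ k : Int, s ≤ k → dm.contains k = false) →
      (((PySem.List.enumerate seq s).foldl bAltStep (db, dm, lo)).1).items
          = db.items ++ (PySem.List.enumerate (segGroups lo seq) s).flatMap pairify
        ∧ (((PySem.List.enumerate seq s).foldl bAltStep (db, dm, lo)).2.1).items
          = dm.items ++ PySem.List.enumerate (segGroups lo seq) s := by
  intro seq
  induction seq with
  | nil =>
    intro s lo db dm _ _ _
    simp [PySem.List.enumerate_nil, segGroups]
  | cons hi rest ih =>
    intro s lo db dm hc hdb hdm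
    have hlohi : lo ≤ hi := (List.pairwise_cons.mp hc).1 hi (by simp)
    have hc' : List.Pairwise (· ≤ ·) (hi :: rest) := (List.pairwise_cons.mp hc).2
    rw [PySem.List.enumerate_cons]
    simp only [List.foldl_cons]
    have hstep :
        bAltStep (db, dm, lo) (s, hi)
          = ((PySem.List.pyRange lo hi).foldl (fun d i => d.insert i s) db,
             dm.insert s (PySem.List.pyRange lo hi), hi) := rfl
    rw [hstep]
    set group := PySem.List.pyRange lo hi with hgroup
    have hdbit :
        ((PySem.List.pyRange lo hi).foldl (fun d i => d.insert i s) db).items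
          = db.items ++ group.map (fun i => (i, s)) := by
      refine PySem.Dict.items_foldl_insert_fresh group (fun i => i) (fun _ => s) db ?_ ?_
      · intro i hig
        have := PySem.List.mem_pyRange_one.mp hig
        exact hdb i (by omega)
      · simpa using pyRange_nodup lo hi
    have hdb' : ∀ i : Int, hi ≤ i →
        ((PySem.List.pyRange lo hi).foldl (fun d i => d.insert i s) db).contains i = false := by
      intro i hii
      rw [PySem.Dict.contains_eq_decide_mem_keys]
      rw [show (fun (d : PySem.Dict Int Int) i => d.insert i s)
            = (fun (d : PySem.Dict Int Int) x => d.insert x ((fun _ _ => s) d x)) from rfl]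
      rw [PySem.Dict.keys_foldl_insert]
      simp only [decide_eq_false_iff_not]
      intro hmem
      rcases (PySem.Set.mem_update _ _ _).mp hmem with hk | hk
      · have : db.contains i = false := hdb i (by omega)
        rw [PySem.Dict.contains_eq_decide_mem_keys] at this
        simp only [decide_eq_false_iff_not] at this
        exact this hk
      · have := PySem.List.mem_pyRange_one.mp hk
        omega
    have hdmit : (dm.insert s group).items = dm.items ++ [(s, group)] :=
      PySem.Dict.items_insert_of_not_contains dm _ (hdm s le_rfl)
    have hdm' : ∀ k : Int, s + 1 ≤ k → (dm.insert s group).contains k = false := by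
      intro k hk
      rw [PySem.Dict.contains_insert]
      have h1 : (k == s) = false := by
        rw [beq_eq_false_iff_ne]; omega
      rw [h1, hdm k (by omega)]
      rfl
    obtain ⟨ih1, ih2⟩ := ih (s + 1) hi _ _ hc' hdb' hdm'
    constructor
    · rw [ih1, hdbit, List.append_assoc]
      simp only [segGroups, PySem.List.enumerate_cons, List.flatMap_cons, pairify]
      rw [hgroup]
    · rw [ih2, hdmit, List.append_assoc]
      simp only [segGroups, PySem.List.enumerate_cons, List.singleton_append]
      rw [hgroup]

lemma mapBertStepB_eq (bpe_tokens : List String) (sep : String) :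
    mapBertStepB bpe_tokens sep
      = fun st i => ((if bF bpe_tokens sep i then st.1 + 1 else st.1),
          st.2 ++ [if bF bpe_tokens sep i then st.1 + 1 else st.1]) := rfl

-- ===== VERDICT (by name: the statement is the Claim_ definition above) =====
theorem map_bpe_moses_bert_spec : Claim_equal_map_bpe_moses_bert := by
  intro bpe_tokens moses_tokens sep _
  show _ = _
  by_cases h : bpe_tokens = []
  · subst h; rfl
  · set n : Int := (bpe_tokens.length : Int) with hn
    have hpos : 0 < n := by
      simp only [hn]
      exact_mod_cast Nat.pos_of_ne_zero (fun hz => h (List.eq_nil_of_length_eq_zero hz))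
    set starts := mapBertStarts bpe_tokens sep n with hstarts
    -- facts about the boundary positions
    have hs_mem : ∀ s ∈ starts, 1 ≤ s ∧ s < n := by
      intro s hs
      have := (List.mem_filter.mp hs).1
      exact PySem.List.mem_pyRange_one.mp this
    have hpw : starts.Pairwise (· < ·) :=
      List.Pairwise.sublist List.filter_sublist (pyRange_pairwise 1 n)
    have hchain_lt : List.Pairwise (· < ·) ((0 : Int) :: (starts ++ [n])) := by
      refine List.pairwise_cons.mpr ⟨?_, ?_⟩
      · intro x hx
        rcases List.mem_append.mp hx with hx | hx
        · exact lt_of_lt_of_le zero_lt_one (hs_mem x hx).1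
        · simpa using (by simpa using hx : x = n) ▸ hpos
      · refine List.pairwise_append.mpr ⟨hpw, by simp, ?_⟩
        intro x hx y hy
        rw [(by simpa using hy : y = n)]
        exact (hs_mem x hx).2
    have hchain_le : List.Pairwise (· ≤ ·) ((0 : Int) :: (starts ++ [n])) :=
      hchain_lt.imp (fun hab => le_of_lt hab)
    -- A's item list is the enumeration of the segmented ids
    have hids :
        ((PySem.List.pyRange 1 n).foldl (mapBertStepB bpe_tokens sep) (0, [(0 : Int)])).2
          = segFlat 0 starts 0 n := by
      rw [mapBertStepB_eq, segfold (bF bpe_tokens sep) (n - 1).toNat 1 n 0 [0] rfl]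
      rw [show (PySem.List.pyRange 1 n).filter (bF bpe_tokens sep) = starts from rfl]
      rw [segFlat_cons 0 starts 0 n hpos (fun s hs => lt_of_lt_of_le zero_lt_one (hs_mem s hs).1)]
      simp
    have hAitems := mapBert_items_eq bpe_tokens sep h
    rw [← hn] at hAitems
    rw [hids] at hAitems
    have hEnum :
        PySem.List.enumerate (segFlat 0 starts 0 n) 0
          = (PySem.List.enumerate (segGroups 0 (starts ++ [n])) 0).flatMap pairify :=
      enumerate_segFlat starts 0 0 n hchain_le
    -- the group keys 0,1,2,… are distinct
    have hkeys : ((PySem.List.enumerate (segGroups 0 (starts ++ [n])) 0).map (·.1)).Nodup := by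
      rw [PySem.List.map_fst_enumerate]
      exact pyRange_nodup _ _
    have hne : ∀ p ∈ PySem.List.enumerate (segGroups 0 (starts ++ [n])) 0, p.2 ≠ [] := by
      intro p hp
      have : p.2 ∈ segGroups 0 (starts ++ [n]) := by
        have := List.mem_map_of_mem (f := (·.2)) hp
        rwa [PySem.List.map_snd_enumerate] at this
      exact segGroups_ne_nil (starts ++ [n]) 0 hchain_lt p.2 this
    -- A's moses_to_bpe dict is exactly the enumerated group list
    have hmoses :
        ((PySem.List.enumerate (segGroups 0 (starts ++ [n])) 0).flatMap pairify).foldl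
            (fun (d : PySem.Dict Int (List Int)) p => d.modify p.2 [] (fun l => l ++ [p.1]))
            PySem.Dict.empty
          = PySem.Dict.mk (PySem.List.enumerate (segGroups 0 (starts ++ [n])) 0) := by
      rw [List.foldl_flatMap]
      have := moses_fold (PySem.List.enumerate (segGroups 0 (starts ++ [n])) 0) []
        hne (by simp) hkeys
      simpa using this
    -- B's fold from the empty state
    have hB := b_fold (starts ++ [n]) 0 0 PySem.Dict.empty PySem.Dict.empty hchain_le
      (fun i _ => PySem.Dict.contains_empty i) (fun k _ => PySem.Dict.contains_empty k)
    obtain ⟨hB1, hB2⟩ := hB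
    -- assemble both components
    show (_, _) = (_, _)
    rw [← hn, if_neg (by omega : ¬ n = 0), ← hstarts]
    rw [hAitems, hEnum, hmoses]
    rw [hB1, hB2]
    simp [PySem.Dict.empty]
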